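-- pv_equiv track=rewrite | github.com/gtakacse/advent-of-tdd | src/python/day02/day02.py | part_2
-- ===== SOURCE A (Python) =====
-- def part_2(games, test_case):
--     # max of each color multipled
--     ans = 0
--     for _, game in games.items():
--         max_red = 0
--         max_green = 0
--         max_blue = 0
--         for bag in game:
--             if bag[0] > max_red:
--                 max_red = bag[0]
--             if bag[1] > max_green:
--                 max_green = bag[1]
--             if bag[2] > max_blue:
--                 max_blue = bag[2]
--         ans += (max_red * max_green * max_blue)
--     return ans
-- ===== SOURCE B (Python) =====
-- def part_2(games, test_case):
--     # Sort each color column (with a 0 floor) and take its last element,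
--     # instead of keeping running maxima while scanning the bags.
--     def top(column):
--         return sorted([0, *column])[-1]
--     return sum(top([bag[0] for bag in game])
--                * top([bag[1] for bag in game])
--                * top([bag[2] for bag in game])
--                for game in games.values())
-- ===== Notes on version B (the rewrite author's own statement) =====
-- stated objective: alternative
-- what changed: Replaces A's single running three-way max loop by sort-then-take-last: each color column (with a 0 floor prepended) is sorted and its last element taken, the three results multiplied and summed over games.values().
import Mathlib
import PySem

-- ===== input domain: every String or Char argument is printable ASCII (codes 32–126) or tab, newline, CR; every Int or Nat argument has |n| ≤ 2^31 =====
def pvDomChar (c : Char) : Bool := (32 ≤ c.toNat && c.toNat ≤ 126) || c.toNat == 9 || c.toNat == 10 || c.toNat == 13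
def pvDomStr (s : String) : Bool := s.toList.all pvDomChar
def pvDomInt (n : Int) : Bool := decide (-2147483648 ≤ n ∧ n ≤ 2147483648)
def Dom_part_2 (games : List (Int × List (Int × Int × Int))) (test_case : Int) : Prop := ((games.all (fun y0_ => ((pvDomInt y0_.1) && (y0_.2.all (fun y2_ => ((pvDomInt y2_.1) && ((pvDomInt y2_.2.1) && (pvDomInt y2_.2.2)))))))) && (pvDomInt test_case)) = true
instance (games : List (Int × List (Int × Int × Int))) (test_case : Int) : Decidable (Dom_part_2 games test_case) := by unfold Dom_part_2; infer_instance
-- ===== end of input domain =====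

-- B replaces A's running three-way max loop by sort-then-take-last on each color column (0 floor
-- prepended), summed over the games (objective: alternative algorithm; not claimed faster).

-- ===== PORT A =====
-- literal transliteration: outer loop over games.items(), inner loop keeping (max_red, max_green, max_blue)
def part_2 (games : List (Int × List (Int × Int × Int))) (test_case : Int) : Int :=
  games.foldl (fun ans p =>
    let m := p.2.foldl (fun (s : Int × Int × Int) bag =>
      ( if bag.1 > s.1 then bag.1 else s.1,
        if bag.2.1 > s.2.1 then bag.2.1 else s.2.1,
        if bag.2.2 > s.2.2 then bag.2.2 else s.2.2 )) (0, 0, 0)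
    ans + m.1 * m.2.1 * m.2.2) 0

-- ===== PORT B =====
-- helper 'top': sorted([0, *column])[-1]; the sorted list is nonempty (0 is in it), so the
-- [-1] index always hits — the .getD 0 default is never taken.
def pvTop (column : List Int) : Int :=
  (PySem.List.pyGet? (PySem.List.sorted (0 :: column) (fun x => x) false) (-1)).getD 0

def part_2_alt (games : List (Int × List (Int × Int × Int))) (test_case : Int) : Int :=
  (games.map (fun p =>
    pvTop (p.2.map (fun bag => bag.1))
    * pvTop (p.2.map (fun bag => bag.2.1))
    * pvTop (p.2.map (fun bag => bag.2.2)))).sum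

-- ===== PRECONDITION & SPEC =====
def Spec_part_2 (games : List (Int × List (Int × Int × Int))) (test_case : Int) (out : Int) : Prop := out = part_2_alt games test_case
instance (games : List (Int × List (Int × Int × Int))) (test_case : Int) (out : Int) : Decidable (Spec_part_2 games test_case out) := by unfold Spec_part_2; infer_instance

-- ===== CLAIM (what is proved, stated in full; the proofs are below) =====
def Claim_equal_part_2 : Prop := ∀ (games : List (Int × List (Int × Int × Int))) (test_case : Int), Dom_part_2 games test_case → Spec_part_2 games test_case (part_2 games test_case)

-- ===== LEMMAS AND PROOFS =====

-- the init is ≤ the result of a max-fold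
theorem pv_init_le_foldl_max (l : List Int) : ∀ (a : Int), a ≤ l.foldl max a := by
  induction l with
  | nil => intro a; simp
  | cons x xs ih => intro a; exact le_trans (le_max_left a x) (ih (max a x))

-- every element of a :: l is ≤ the max-fold of l started at a
theorem pv_le_foldl_max (l : List Int) : ∀ (a y : Int), y ∈ a :: l → y ≤ l.foldl max a := by
  induction l with
  | nil => intro a y hy; simp at hy; simp [hy]
  | cons x xs ih =>
    intro a y hy
    simp only [List.mem_cons] at hy
    simp only [List.foldl_cons]
    rcases hy with h | h | h
    · subst h; exact le_trans (le_max_left y x) (pv_init_le_foldl_max xs (max y x))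
    · subst h; exact le_trans (le_max_right a y) (pv_init_le_foldl_max xs (max a y))
    · exact ih (max a x) y (List.mem_cons_of_mem _ h)

-- the max-fold result is an element of a :: l
theorem pv_foldl_max_mem (l : List Int) : ∀ (a : Int), l.foldl max a ∈ a :: l := by
  induction l with
  | nil => intro a; simp
  | cons x xs ih =>
    intro a
    have := ih (max a x)
    simp only [List.foldl_cons]
    rcases List.mem_cons.mp this with h | h
    · rcases max_choice a x with hm | hm <;> rw [h, hm] <;> simp
    · exact List.mem_cons_of_mem _ (List.mem_cons_of_mem _ h)

-- in a ≤-sorted nonempty list every element is ≤ the last one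
theorem pv_pairwise_le_getLast (l : List Int) (h : l ≠ []) (hp : l.Pairwise (· ≤ ·)) :
    ∀ y ∈ l, y ≤ l.getLast h := by
  induction l with
  | nil => cases h rfl
  | cons x xs ih =>
    intro y hy
    cases xs with
    | nil => simp at hy; simp [hy]
    | cons z zs =>
      rw [List.getLast_cons (by simp)]
      rcases List.mem_cons.mp hy with h1 | h1
      · subst h1
        have hx : ∀ w ∈ z :: zs, y ≤ w := (List.pairwise_cons.mp hp).1
        exact le_trans (hx _ (List.getLast_mem _)) (le_refl _)
      · exact ih (by simp) (List.pairwise_cons.mp hp).2 y h1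

-- pvTop computes the max-fold over 0 :: column
theorem pv_top_eq (col : List Int) : pvTop col = col.foldl max 0 := by
  unfold pvTop
  set s := PySem.List.sorted (0 :: col) (fun x => x) false with hs
  have hperm : s.Perm (0 :: col) := PySem.List.sorted_perm _ _ _
  have hne : s ≠ [] := by
    simp [hs, PySem.List.sorted_eq_nil_iff]
  have hpw : s.Pairwise (· ≤ ·) := by
    simpa using PySem.List.sorted_pairwise (xs := 0 :: col) (key := fun x => x)
  rw [PySem.List.pyGet?_neg_one, List.getLast?_eq_getLast_of_ne_nil hne]
  have hmem : s.getLast hne ∈ 0 :: col := hperm.mem_iff.mp (List.getLast_mem hne)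
  have h1 : s.getLast hne ≤ col.foldl max 0 := pv_le_foldl_max col 0 _ hmem
  have h2 : col.foldl max 0 ≤ s.getLast hne :=
    pv_pairwise_le_getLast s hne hpw _ (hperm.mem_iff.mpr (pv_foldl_max_mem col 0))
  simpa using le_antisymm h1 h2

-- A's inner loop computes the three column max-folds componentwise
theorem pv_inner (game : List (Int × Int × Int)) : ∀ (r g b : Int),
    game.foldl (fun (s : Int × Int × Int) bag =>
      ( if bag.1 > s.1 then bag.1 else s.1,
        if bag.2.1 > s.2.1 then bag.2.1 else s.2.1,
        if bag.2.2 > s.2.2 then bag.2.2 else s.2.2 )) (r, g, b)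
    = ((game.map (fun bag => bag.1)).foldl max r,
       (game.map (fun bag => bag.2.1)).foldl max g,
       (game.map (fun bag => bag.2.2)).foldl max b) := by
  induction game with
  | nil => intro r g b; simp
  | cons x xs ih =>
    intro r g b
    simp only [List.foldl_cons, List.map_cons, ih]
    congr 1 <;> [skip; congr 1] <;>
      · congr 1
        split <;> simp [max_def] <;> omega

-- the accumulator loop is the sum of the per-game powers
theorem pv_outer (games : List (Int × List (Int × Int × Int))) (f : (Int × List (Int × Int × Int)) → Int) :
    ∀ (a : Int), games.foldl (fun ans p => ans + f p) a = a + (games.map f).sum := by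
  induction games with
  | nil => intro a; simp
  | cons x xs ih => intro a; simp [List.foldl_cons, ih]; ring

-- ===== VERDICT (by name: the statement is the Claim_ definition above) =====
theorem part_2_spec : Claim_equal_part_2 := by
  intro games test_case _
  show part_2 games test_case = part_2_alt games test_case
  unfold part_2 part_2_alt
  have h : (fun (ans : Int) (p : Int × List (Int × Int × Int)) =>
      let m := p.2.foldl (fun (s : Int × Int × Int) bag =>
        ( if bag.1 > s.1 then bag.1 else s.1,
          if bag.2.1 > s.2.1 then bag.2.1 else s.2.1,
          if bag.2.2 > s.2.2 then bag.2.2 else s.2.2 )) (0, 0, 0)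
      ans + m.1 * m.2.1 * m.2.2)
      = (fun ans p => ans +
          (pvTop (p.2.map (fun bag => bag.1))
           * pvTop (p.2.map (fun bag => bag.2.1))
           * pvTop (p.2.map (fun bag => bag.2.2)))) := by
    funext ans p
    simp only [pv_inner p.2, pv_top_eq]
  rw [h, pv_outer]
  simp
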